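-- pv_equiv track=rewrite | github.com/xsaiter/isasln | src/olymp/cf/2051/e/sol.py | solve
-- ===== SOURCE A (Python) =====
-- import bisect
--
-- def solve(n, k, a, b):
--     ans = 0
--     a = sorted(a)
--     b = sorted(b)
--     c = list(a + b)
--     for x in c:
--         nb = n - bisect.bisect_left(b, x)
--         na = n - (bisect.bisect_left(a, x))
--         cnt = nb - na
--         if cnt <= k:
--             ans = max(ans, x * nb)
--
--     return ans
-- ===== SOURCE B (Python) =====
-- def solve(n, k, a, b):
--     sa = sorted(a)
--     sb = sorted(b)
--     ans = 0
--     i = 0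
--     j = 0
--     for x in sorted(set(a + b)):
--         while i < len(sa) and sa[i] < x:
--             i += 1
--         while j < len(sb) and sb[j] < x:
--             j += 1
--         if i - j <= k:
--             ans = max(ans, x * (n - j))
--     return ans
-- ===== Notes on version B (the rewrite author's own statement) =====
-- stated objective: alternative
-- what changed: Replaces A's per-candidate bisect binary searches over the full multiset a+b with a single merge-style sweep over the distinct sorted candidates, maintaining the two '>= x' counters incrementally with two advancing pointers.
import Mathlib
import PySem

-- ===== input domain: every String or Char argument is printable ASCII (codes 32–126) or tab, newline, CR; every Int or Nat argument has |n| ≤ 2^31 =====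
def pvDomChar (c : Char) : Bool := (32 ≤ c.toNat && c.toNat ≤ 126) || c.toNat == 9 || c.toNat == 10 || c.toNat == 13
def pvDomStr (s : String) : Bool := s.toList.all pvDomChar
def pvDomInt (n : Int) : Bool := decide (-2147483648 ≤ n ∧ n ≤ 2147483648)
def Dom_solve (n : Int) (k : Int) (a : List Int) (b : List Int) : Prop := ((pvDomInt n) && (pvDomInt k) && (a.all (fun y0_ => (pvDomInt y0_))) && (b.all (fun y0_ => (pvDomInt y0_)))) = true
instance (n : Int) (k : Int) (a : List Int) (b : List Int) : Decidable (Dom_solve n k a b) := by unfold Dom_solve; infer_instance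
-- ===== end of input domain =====

-- B replaces the per-candidate bisect binary searches with a single merge-style sweep
-- over the distinct sorted candidates, advancing two pointers incrementally (objective:
-- alternative decomposition, same asymptotic cost).

-- ===== PORT A =====
def solve (n : Int) (k : Int) (a : List Int) (b : List Int) : Int :=
  let a := PySem.List.sorted a (fun x => x)
  let b := PySem.List.sorted b (fun x => x)
  let c := a ++ b
  c.foldl (fun ans x =>
    let nb := n - (PySem.List.bisectLeft b x : Int)
    let na := n - (PySem.List.bisectLeft a x : Int)
    let cnt := nb - na
    if cnt ≤ k then max ans (x * nb) else ans) 0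

-- ===== PORT B =====
-- the 'while i < len(s) and s[i] < x: i += 1' loop of Source B
def pvAdvance (s : List Int) (x : Int) (i : Nat) : Nat :=
  if h : i < s.length then
    if s[i] < x then pvAdvance s x (i + 1) else i
  else i
termination_by s.length - i

-- the 'for x in sorted(set(a + b))' loop of Source B, state (i, j, ans)
def pvSweep (n : Int) (k : Int) (sa : List Int) (sb : List Int) :
    List Int → Nat → Nat → Int → Int
  | [], _, _, ans => ans
  | x :: cs, i, j, ans =>
    let i' := pvAdvance sa x i
    let j' := pvAdvance sb x j
    let ans' := if (i' : Int) - (j' : Int) ≤ k then max ans (x * (n - (j' : Int))) else ans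
    pvSweep n k sa sb cs i' j' ans'

def solve_alt (n : Int) (k : Int) (a : List Int) (b : List Int) : Int :=
  let sa := PySem.List.sorted a (fun x => x)
  let sb := PySem.List.sorted b (fun x => x)
  pvSweep n k sa sb (PySem.List.sorted (PySem.Set.ofList (a ++ b)) (fun x => x)) 0 0 0

-- ===== PRECONDITION & SPEC =====
def Spec_solve (n : Int) (k : Int) (a : List Int) (b : List Int) (out : Int) : Prop := out = solve_alt n k a b
instance (n : Int) (k : Int) (a : List Int) (b : List Int) (out : Int) : Decidable (Spec_solve n k a b out) := by unfold Spec_solve; infer_instance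

-- ===== CLAIM (what is proved, stated in full; the proofs are below) =====
def Claim_equal_solve : Prop := ∀ (n : Int) (k : Int) (a : List Int) (b : List Int), Dom_solve n k a b → Spec_solve n k a b (solve n k a b)

-- ===== LEMMAS AND PROOFS =====

-- the step function both folds compute (candidate x updates ans)
def pvStep (n : Int) (k : Int) (sa : List Int) (sb : List Int) (ans : Int) (x : Int) : Int :=
  let nb := n - (PySem.List.bisectLeft sb x : Int)
  let na := n - (PySem.List.bisectLeft sa x : Int)
  let cnt := nb - na
  if cnt ≤ k then max ans (x * nb) else ans

theorem pvBisect_lt_iff (s : List Int) (x : Int)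
    (hs : s.Pairwise (· ≤ ·)) (i : Nat) (hi : i < s.length) :
    s[i] < x ↔ i < PySem.List.bisectLeft s x := by
  obtain ⟨hle, hlt, hge⟩ := PySem.List.bisectLeft_spec s x hs
  constructor
  · intro h
    by_contra hc
    exact absurd (hge i hi (Nat.le_of_not_lt hc)) (by omega)
  · intro h
    exact hlt i hi h

theorem pvBisect_mono (s : List Int) (x y : Int)
    (hs : s.Pairwise (· ≤ ·)) (hxy : x ≤ y) :
    PySem.List.bisectLeft s x ≤ PySem.List.bisectLeft s y := by
  obtain ⟨hle, hlt, hge⟩ := PySem.List.bisectLeft_spec s x hs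
  obtain ⟨hle', hlt', hge'⟩ := PySem.List.bisectLeft_spec s y hs
  by_contra hc
  push Not at hc
  have hj : PySem.List.bisectLeft s y < s.length := lt_of_lt_of_le hc hle
  have h1 := hlt _ hj hc
  have h2 := hge' _ hj (le_refl _)
  omega

theorem pvAdvance_eq (s : List Int) (x : Int) (hs : s.Pairwise (· ≤ ·)) :
    ∀ (d i : Nat), s.length - i ≤ d → i ≤ PySem.List.bisectLeft s x →
      pvAdvance s x i = PySem.List.bisectLeft s x := by
  obtain ⟨hle, hlt, hge⟩ := PySem.List.bisectLeft_spec s x hs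
  intro d
  induction d with
  | zero =>
    intro i hd hi
    have hlen : s.length ≤ i := by omega
    unfold pvAdvance
    rw [dif_neg (by omega)]
    omega
  | succ d ih =>
    intro i hd hi
    unfold pvAdvance
    by_cases hil : i < s.length
    · rw [dif_pos hil]
      by_cases hx : s[i] < x
      · rw [if_pos hx]
        have : i < PySem.List.bisectLeft s x := (pvBisect_lt_iff s x hs i hil).1 hx
        exact ih (i + 1) (by omega) (by omega)
      · rw [if_neg hx]
        have : ¬ i < PySem.List.bisectLeft s x := fun h =>
          hx ((pvBisect_lt_iff s x hs i hil).2 h)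
        omega
    · rw [dif_neg hil]
      omega

theorem pvSweep_eq_foldl (n k : Int) (sa sb : List Int)
    (hsa : sa.Pairwise (· ≤ ·)) (hsb : sb.Pairwise (· ≤ ·)) :
    ∀ (cs : List Int) (i j : Nat) (ans : Int),
      cs.Pairwise (· ≤ ·) →
      (∀ y ∈ cs, i ≤ PySem.List.bisectLeft sa y ∧ j ≤ PySem.List.bisectLeft sb y) →
      pvSweep n k sa sb cs i j ans = cs.foldl (pvStep n k sa sb) ans := by
  intro cs
  induction cs with
  | nil => intro i j ans _ _; simp [pvSweep]
  | cons x cs ih =>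
    intro i j ans hpw hbound
    have hx := hbound x (List.mem_cons_self)
    have hi' : pvAdvance sa x i = PySem.List.bisectLeft sa x :=
      pvAdvance_eq sa x hsa _ i (le_refl _) hx.1
    have hj' : pvAdvance sb x j = PySem.List.bisectLeft sb x :=
      pvAdvance_eq sb x hsb _ j (le_refl _) hx.2
    have hpw' : cs.Pairwise (· ≤ ·) := hpw.of_cons
    have hxle : ∀ y ∈ cs, x ≤ y := fun y hy => (List.pairwise_cons.1 hpw).1 y hy
    simp only [pvSweep, hi', hj']
    rw [ih _ _ _ hpw' ?_]
    · rw [List.foldl_cons]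
      congr 1
      simp only [pvStep]
      exact if_congr (by constructor <;> intro h <;> omega) rfl rfl
    · intro y hy
      exact ⟨pvBisect_mono sa x y hsa (hxle y hy), pvBisect_mono sb x y hsb (hxle y hy)⟩

-- fold bound lemmas: the fold of pvStep is the max of ans and the admissible candidate values
theorem pvFoldl_ge_init (n k : Int) (sa sb : List Int) :
    ∀ (l : List Int) (ans : Int), ans ≤ l.foldl (pvStep n k sa sb) ans := by
  intro l
  induction l with
  | nil => intro ans; simp
  | cons x l ih =>
    intro ans
    refine le_trans ?_ (ih (pvStep n k sa sb ans x))
    simp only [pvStep]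
    split <;> simp

theorem pvFoldl_ge_mem (n k : Int) (sa sb : List Int) :
    ∀ (l : List Int) (ans x : Int), x ∈ l →
      ((n - (PySem.List.bisectLeft sb x : Int)) - (n - (PySem.List.bisectLeft sa x : Int)) ≤ k) →
      x * (n - (PySem.List.bisectLeft sb x : Int)) ≤ l.foldl (pvStep n k sa sb) ans := by
  intro l
  induction l with
  | nil => intro ans x h; simp at h
  | cons y l ih =>
    intro ans x hmem hcond
    rcases List.mem_cons.1 hmem with rfl | hmem'
    · refine le_trans ?_ (pvFoldl_ge_init n k sa sb l _)
      simp only [pvStep]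
      rw [if_pos hcond]
      exact le_max_right _ _
    · exact ih _ x hmem' hcond

theorem pvFoldl_le (n k : Int) (sa sb : List Int) :
    ∀ (l : List Int) (ans M : Int), ans ≤ M →
      (∀ x ∈ l, ((n - (PySem.List.bisectLeft sb x : Int)) - (n - (PySem.List.bisectLeft sa x : Int)) ≤ k) →
        x * (n - (PySem.List.bisectLeft sb x : Int)) ≤ M) →
      l.foldl (pvStep n k sa sb) ans ≤ M := by
  intro l
  induction l with
  | nil => intro ans M h _; simpa using h
  | cons x l ih =>
    intro ans M hans hall
    simp only [List.foldl_cons]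
    refine ih _ M ?_ (fun y hy => hall y (List.mem_cons_of_mem _ hy))
    simp only [pvStep]
    split
    · exact max_le hans (hall x List.mem_cons_self ‹_›)
    · exact hans

-- folds of pvStep starting at 0 depend only on the set of elements of the list
theorem pvFoldl_mem_congr (n k : Int) (sa sb : List Int) (l₁ l₂ : List Int)
    (h : ∀ x, x ∈ l₁ ↔ x ∈ l₂) :
    l₁.foldl (pvStep n k sa sb) 0 = l₂.foldl (pvStep n k sa sb) 0 := by
  apply le_antisymm
  · exact pvFoldl_le n k sa sb l₁ 0 _ (pvFoldl_ge_init n k sa sb l₂ 0)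
      (fun x hx hc => pvFoldl_ge_mem n k sa sb l₂ 0 x ((h x).1 hx) hc)
  · exact pvFoldl_le n k sa sb l₂ 0 _ (pvFoldl_ge_init n k sa sb l₁ 0)
      (fun x hx hc => pvFoldl_ge_mem n k sa sb l₁ 0 x ((h x).2 hx) hc)

theorem solve_eq_foldl (n k : Int) (a b : List Int) :
    solve n k a b =
      ((PySem.List.sorted a (fun x => x)) ++ (PySem.List.sorted b (fun x => x))).foldl
        (pvStep n k (PySem.List.sorted a (fun x => x)) (PySem.List.sorted b (fun x => x))) 0 := rfl

-- ===== VERDICT (by name: the statement is the Claim_ definition above) =====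
theorem solve_spec : Claim_equal_solve := by
  intro n k a b _
  unfold Spec_solve
  set sa := PySem.List.sorted a (fun x => x) with hsa_def
  set sb := PySem.List.sorted b (fun x => x) with hsb_def
  set cands := PySem.List.sorted (PySem.Set.ofList (a ++ b)) (fun x => x) with hcands_def
  have hsa : sa.Pairwise (· ≤ ·) := PySem.List.sorted_pairwise a (fun x => x)
  have hsb : sb.Pairwise (· ≤ ·) := PySem.List.sorted_pairwise b (fun x => x)
  have hcands : cands.Pairwise (· ≤ ·) :=
    (PySem.List.sorted_ofList_pairwise_lt (a ++ b)).imp (fun h => le_of_lt h)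
  have halt : solve_alt n k a b = cands.foldl (pvStep n k sa sb) 0 := by
    show pvSweep n k sa sb cands 0 0 0 = _
    exact pvSweep_eq_foldl n k sa sb hsa hsb cands 0 0 0 hcands
      (fun y _ => ⟨Nat.zero_le _, Nat.zero_le _⟩)
  rw [solve_eq_foldl, halt]
  apply pvFoldl_mem_congr
  intro x
  simp only [hcands_def, List.mem_append,
    PySem.List.mem_sorted, PySem.Set.mem_ofList]
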